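-- pv_equiv track=rewrite | github.com/jaalonso/Exercitium-Python | src/Polinomios_Transformaciones_dispersa_y_densa.py | dispersaAdensa
-- ===== SOURCE A (Python) =====
-- from typing import TypeVar
--
-- A = TypeVar('A', int, float, complex)
--
-- def dispersaAdensa(ps: list[tuple[int, A]]) -> list[A]:
--     if not ps:
--         return []
--     if len(ps) == 1:
--         return [ps[0][1]] + [0] * ps[0][0]
--     (n, a) = ps[0]
--     (m, b) = ps[1]
--     return [a] + [0] * (n-m-1) + dispersaAdensa(ps[1:])
-- ===== SOURCE B (Python) =====
-- def dispersaAdensa(ps):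
--     nexts = [d for d, _ in ps[1:]] + [-1]
--     out = []
--     for (d, c), nd in zip(ps, nexts):
--         out.append(c)
--         out.extend([0] * (d - nd - 1))
--     return out
-- ===== Notes on version B (the rewrite author's own statement) =====
-- stated objective: faster
-- what changed: Replaces the three-case recursion with per-step ps[1:] slicing by a single flat loop over pairs zipped with their successor degree (sentinel -1), unifying the last-element and gap cases into one formula d - next - 1.
import Mathlib
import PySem

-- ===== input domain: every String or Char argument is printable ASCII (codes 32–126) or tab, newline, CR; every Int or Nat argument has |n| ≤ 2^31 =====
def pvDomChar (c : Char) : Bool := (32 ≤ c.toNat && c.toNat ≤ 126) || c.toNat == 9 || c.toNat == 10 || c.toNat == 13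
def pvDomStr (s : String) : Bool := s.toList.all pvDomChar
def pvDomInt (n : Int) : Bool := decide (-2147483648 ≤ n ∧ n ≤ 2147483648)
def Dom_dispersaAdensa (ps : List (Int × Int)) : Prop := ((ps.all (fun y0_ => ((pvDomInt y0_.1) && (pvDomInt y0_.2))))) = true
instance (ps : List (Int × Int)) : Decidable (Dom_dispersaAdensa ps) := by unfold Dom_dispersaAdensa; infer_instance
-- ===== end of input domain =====

-- B replaces A's three-case recursion with slicing by one flat loop over pairs zipped
-- with their successor degree (sentinel -1); same return value on every input.

-- ===== PORT A =====
-- Python [0] * k with k possibly negative: List.replicate k.toNat 0 (toNat clamps at 0, exactly Python's behaviour)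
def dispersaAdensa : List (Int × Int) → List Int
  | [] => []
  | [(n, a)] => a :: List.replicate n.toNat 0
  | (n, a) :: (m, b) :: rest =>
      a :: (List.replicate (n - m - 1).toNat 0 ++ dispersaAdensa ((m, b) :: rest))

-- ===== PORT B =====
def dispersaAdensa_alt (ps : List (Int × Int)) : List Int :=
  let nexts := ((ps.drop 1).map Prod.fst) ++ [-1]
  (ps.zip nexts).foldl
    (fun out x => (out ++ [x.1.2]) ++ List.replicate (x.1.1 - x.2 - 1).toNat 0) []

-- ===== PRECONDITION & SPEC =====
def Spec_dispersaAdensa (ps : List (Int × Int)) (out : List Int) : Prop := out = dispersaAdensa_alt ps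
instance (ps : List (Int × Int)) (out : List Int) : Decidable (Spec_dispersaAdensa ps out) := by unfold Spec_dispersaAdensa; infer_instance

-- ===== CLAIM (what is proved, stated in full; the proofs are below) =====
def Claim_equal_dispersaAdensa : Prop := ∀ (ps : List (Int × Int)), Dom_dispersaAdensa ps → Spec_dispersaAdensa ps (dispersaAdensa ps)

-- ===== LEMMAS AND PROOFS =====

-- B's loop body as one segment per (pair, next-degree)
def pvSeg (x : (Int × Int) × Int) : List Int :=
  x.1.2 :: List.replicate (x.1.1 - x.2 - 1).toNat 0

theorem dispersaAdensa_alt_eq_flatMap (ps : List (Int × Int)) :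
    dispersaAdensa_alt ps =
      (ps.zip (((ps.drop 1).map Prod.fst) ++ [-1])).flatMap pvSeg := by
  unfold dispersaAdensa_alt
  have h := PySem.List.foldl_append_eq_flatMap (l := ps.zip (((ps.drop 1).map Prod.fst) ++ [-1]))
    (g := pvSeg) (acc := [])
  simp only [List.nil_append] at h
  rw [← h]
  simp [pvSeg]

theorem dispersaAdensa_eq_flatMap (ps : List (Int × Int)) :
    dispersaAdensa ps =
      (ps.zip (((ps.drop 1).map Prod.fst) ++ [-1])).flatMap pvSeg := by
  induction ps using dispersaAdensa.induct with
  | case1 => simp [dispersaAdensa]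
  | case2 n a =>
      simp [dispersaAdensa, pvSeg]
  | case3 n a m b rest ih =>
      simp only [dispersaAdensa, List.drop_succ_cons, List.drop_zero, List.map_cons,
        List.cons_append, List.zip_cons_cons, List.flatMap_cons] at ih ⊢
      rw [ih]
      simp [pvSeg]

-- ===== VERDICT (by name: the statement is the Claim_ definition above) =====
theorem dispersaAdensa_spec : Claim_equal_dispersaAdensa := by
  intro ps _
  unfold Spec_dispersaAdensa
  rw [dispersaAdensa_eq_flatMap, dispersaAdensa_alt_eq_flatMap]
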